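-- pv_equiv track=rewrite | github.com/NasTsepyuk/course-2130 | python/homework_1/template.py | t10
-- ===== SOURCE A (Python) =====
-- def t10(string):
--     """
--     Произведите смешивание цветов. Вам будет дана строка, необходимо смешать все пары цветов и вернуть результируюший
--         цвет
--
--     Комбинации цветов:    G G     B G    R G   B R
--     Результирующий цвет:   G       R      B     G
--
--     R R G B R G B B  <- ввод
--      R B R G B R B
--       G G B R G G
--        G R G B G
--         B B R R
--          B G R
--           R B
--            G  <-- вывод
--
--     """
--     string = [x for x in string]
--
--     colors = ['B', 'G', 'R']
--
--     while len(string) != 1: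
--         for i in range(len(string) - 1):
--             if string[i] != string[i + 1]:
--                 string[i] = [x for x in colors if x not in string[i:i + 2]][0]
--         string.pop()
--     return string[0]
-- ===== SOURCE B (Python) =====
-- def t10(string):
--     # Single left-to-right pass maintaining the anti-diagonal of the mixing
--     # triangle (diag[t] = rightmost element of row t seen so far), instead of
--     # rebuilding the whole row n-1 times.
--     def op(a, b):
--         if a == b:
--             return a
--         for x in ('B', 'G', 'R'):
--             if x != a and x != b:
--                 return x
--
--     diag = []
--     for c in string:
--         cur = c
--         for t in range(len(diag)):
--             old = diag[t]
--             diag[t] = cur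
--             cur = op(old, cur)
--         diag.append(cur)
--     return diag[-1]
-- ===== Notes on version B (the rewrite author's own statement) =====
-- stated objective: faster
-- what changed: B computes the mixing triangle column-wise in a single left-to-right pass over the input, maintaining only the anti-diagonal (the rightmost element of every row so far) and a constant-time pair-mixing helper, instead of A's repeated whole-row rewrites with per-pair slicing, list comprehensions and pops.
import Mathlib
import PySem

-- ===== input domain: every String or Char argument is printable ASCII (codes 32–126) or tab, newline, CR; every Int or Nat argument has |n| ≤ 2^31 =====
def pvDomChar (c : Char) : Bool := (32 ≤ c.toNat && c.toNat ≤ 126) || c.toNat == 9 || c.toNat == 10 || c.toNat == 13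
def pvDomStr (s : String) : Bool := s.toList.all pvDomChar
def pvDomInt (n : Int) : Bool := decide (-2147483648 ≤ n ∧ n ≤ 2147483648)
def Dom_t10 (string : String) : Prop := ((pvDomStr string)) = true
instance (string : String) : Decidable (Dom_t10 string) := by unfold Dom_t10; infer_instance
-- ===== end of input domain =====

-- B replaces A's repeated whole-row rewrites of the colour triangle by one left-to-right
-- pass that maintains only the triangle's anti-diagonal (constant-factor faster, same O(n^2)).

-- ===== PORT A =====
-- colors = ['B', 'G', 'R']
def t10Colors : List Char := ['B', 'G', 'R']

-- body of `for i in range(len(string) - 1)`; i and i+1 are in range there, so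
-- List.getD is exact for string[i] / string[i+1], and `x not in string[i:i+2]`
-- is `¬(x == string[i] || x == string[i+1])`.
def t10Step (st : List Char) (i : Nat) : List Char :=
  if st.getD i ' ' ≠ st.getD (i + 1) ' ' then
    st.set i ((t10Colors.filter (fun x => !(x == st.getD i ' ' || x == st.getD (i + 1) ' '))).headD ' ')
  else st

-- one iteration of the while body before the pop (range over ints ≥ 0: Nat range is exact)
def t10Row (l : List Char) : List Char :=
  (List.range (l.length - 1)).foldl t10Step l

theorem t10Step_length (st : List Char) (i : Nat) : (t10Step st i).length = st.length := by
  unfold t10Step; split <;> simp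

theorem t10Row_length (l : List Char) : (t10Row l).length = l.length := by
  unfold t10Row
  generalize List.range (l.length - 1) = r
  induction r generalizing l with
  | nil => rfl
  | cons i r ih => simpa [List.foldl_cons, t10Step_length] using (ih (t10Step l i)).trans (t10Step_length l i)

-- `while len(string) != 1: … ; string.pop()`; len 0 raises on pop (excluded by Pre_),
-- so the guard here is `≤ 1` only to totalise.
def t10While (l : List Char) : List Char :=
  if _h : l.length ≤ 1 then l
  else t10While ((t10Row l).dropLast)
termination_by l.length
decreasing_by
  simp only [List.length_dropLast, t10Row_length]; omega

def t10 (string : String) : String :=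
  -- return string[0]  (the remaining list has length 1 under Pre_)
  String.mk [(t10While string.toList).getD 0 ' ']

-- ===== PORT B =====
-- op(a, b): if a == b return a; else first x in ('B','G','R') with x != a and x != b
def t10OpB (a b : Char) : Char :=
  if a = b then a
  else ((['B', 'G', 'R'] : List Char).filter (fun x => x != a && x != b)).headD ' '

-- inner loop `for t in range(len(diag)): old = diag[t]; diag[t] = cur; cur = op(old, cur)`,
-- then `diag.append(cur)`; the in-place writes are the functional rebuild p.1
def t10AltStep (diag : List Char) (c : Char) : List Char :=
  let p := diag.foldl (fun (p : List Char × Char) old => (p.1 ++ [p.2], t10OpB old p.2)) (([] : List Char), c)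
  p.1 ++ [p.2]

def t10_alt (string : String) : String :=
  -- return diag[-1]  (diag nonempty under Pre_)
  String.mk [(string.toList.foldl t10AltStep []).getLastD ' ']

-- ===== PRECONDITION & SPEC =====
-- Pre_ excludes only the empty string, on which A raises IndexError (pop from empty list).
def Pre_t10 (string : String) : Prop := string ≠ ""
instance (string : String) : Decidable (Pre_t10 string) := by unfold Pre_t10; infer_instance

def pvWitness_t10 : String := "RRGBRGBB"

def Spec_t10 (string : String) (out : String) : Prop := out = t10_alt string
instance (string : String) (out : String) : Decidable (Spec_t10 string out) := by unfold Spec_t10; infer_instance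

-- ===== CLAIM (what is proved, stated in full; the proofs are below) =====
def Claim_equal_t10 : Prop := ∀ (string : String), Dom_t10 string → Pre_t10 string → Spec_t10 string (t10 string)

-- ===== LEMMAS AND PROOFS =====

-- one row of the triangle, as a structural recursion (reference form shared by both proofs)
def zipOp : List Char → List Char
  | a :: b :: r => t10OpB a b :: zipOp (b :: r)
  | _ => []

theorem t10OpB_self (a : Char) : t10OpB a a = a := by simp [t10OpB]

theorem zipOp_length (l : List Char) : (zipOp l).length = l.length - 1 := by
  induction l with
  | nil => rfl
  | cons a t ih =>
    cases t with
    | nil => rfl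
    | cons b r => simp only [zipOp, List.length_cons] at *; omega

theorem zipOp_getD (l : List Char) : ∀ j, j < l.length - 1 →
    (zipOp l).getD j ' ' = t10OpB (l.getD j ' ') (l.getD (j + 1) ' ') := by
  induction l with
  | nil => intro j hj; simp at hj
  | cons a t ih =>
    cases t with
    | nil => intro j hj; simp at hj
    | cons b r =>
      intro j hj
      cases j with
      | zero => rfl
      | succ j =>
        have := ih j (by simp at hj ⊢; omega)
        simpa [zipOp] using this

theorem filter_pick_eq (a b : Char) :
    (t10Colors.filter (fun x => !(x == a || x == b))).headD ' '
      = (t10Colors.filter (fun x => x != a && x != b)).headD ' ' := by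
  have : (fun (x : Char) => !(x == a || x == b)) = (fun x => x != a && x != b) := by
    funext x; simp [bne, Bool.not_or]
  rw [this]

theorem t10OpB_of_ne (a b : Char) (h : a ≠ b) :
    t10OpB a b = (t10Colors.filter (fun x => !(x == a || x == b))).headD ' ' := by
  rw [filter_pick_eq]; simp [t10OpB, h, t10Colors]

theorem getD_set_self (l : List Char) (k : Nat) (v d : Char) (hk : k < l.length) :
    (l.set k v).getD k d = v := by
  simp [List.getD, hk]

theorem getD_set_ne (l : List Char) (k j : Nat) (v d : Char) (h : k ≠ j) :
    (l.set k v).getD j d = l.getD j d := by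
  simp [List.getD, List.getElem?_set_ne h]

-- invariant of A's inner for-loop
theorem rowFold_getD (l : List Char) : ∀ k, k ≤ l.length - 1 →
    ((List.range k).foldl t10Step l).length = l.length ∧
    ∀ j, ((List.range k).foldl t10Step l).getD j ' ' =
      if j < k then t10OpB (l.getD j ' ') (l.getD (j + 1) ' ') else l.getD j ' ' := by
  intro k
  induction k with
  | zero => intro _; simp
  | succ k ih =>
    intro hk
    obtain ⟨hlen, hval⟩ := ih (by omega)
    rw [List.range_succ, List.foldl_append]
    set st := (List.range k).foldl t10Step l with hst
    have ha : st.getD k ' ' = l.getD k ' ' := by rw [hval k]; simp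
    have hb : st.getD (k + 1) ' ' = l.getD (k + 1) ' ' := by rw [hval (k + 1)]; simp
    simp only [List.foldl_cons, List.foldl_nil]
    unfold t10Step
    rw [ha, hb]
    split
    · rename_i hne
      constructor
      · simp [hlen]
      · intro j
        by_cases hjk : j = k
        · subst hjk
          rw [getD_set_self _ _ _ _ (by omega)]
          rw [t10OpB_of_ne _ _ hne]
          simp
        · rw [getD_set_ne _ _ _ _ _ (fun h => hjk h.symm), hval j]
          by_cases h1 : j < k
          · simp [h1, Nat.lt_succ_of_lt h1]
          · have h2 : ¬ j < k + 1 := by omega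
            simp [h1, h2]
    · rename_i heq
      rw [not_ne_iff] at heq
      refine ⟨hlen, fun j => ?_⟩
      rw [hval j]
      by_cases hjk : j = k
      · subst hjk
        rw [if_neg (lt_irrefl j), if_pos (Nat.lt_succ_self j), ← heq, t10OpB_self]
      · by_cases h1 : j < k
        · simp [h1, Nat.lt_succ_of_lt h1]
        · have h2 : ¬ j < k + 1 := by omega
          simp [h1, h2]

theorem t10Row_dropLast (l : List Char) : (t10Row l).dropLast = zipOp l := by
  obtain ⟨hlen, hval⟩ := rowFold_getD l (l.length - 1) le_rfl
  apply List.ext_getElem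
  · simp [List.length_dropLast, t10Row_length, zipOp_length]
  · intro j h1 h2
    have hj : j < l.length - 1 := by simpa [zipOp_length] using h2
    have hjr : j < (t10Row l).length := by rw [t10Row_length]; omega
    have hD : (t10Row l).getD j ' ' = (zipOp l).getD j ' ' := by
      rw [zipOp_getD l j hj]
      unfold t10Row
      rw [hval j]
      simp [hj]
    rw [List.getElem_dropLast, ← List.getD_eq_getElem _ ' ' hjr, ← List.getD_eq_getElem _ ' ' h2]
    exact hD

theorem t10While_eq : ∀ (n : Nat) (l : List Char), l.length = n + 1 → t10While l = zipOp^[n] l := by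
  intro n
  induction n with
  | zero =>
    intro l hl
    rw [t10While]
    simp [hl]
  | succ n ih =>
    intro l hl
    rw [t10While]
    have hgt : ¬ l.length ≤ 1 := by omega
    rw [dif_neg hgt, t10Row_dropLast]
    have hlen : (zipOp l).length = n + 1 := by rw [zipOp_length]; omega
    rw [ih _ hlen, Function.iterate_succ_apply]

-- B-side: the rightmost element of row t after appending c
def elast (xs : List Char) (c : Char) : Nat → Char
  | 0 => c
  | t + 1 => t10OpB ((zipOp^[t] xs).getLastD ' ') (elast xs c t)

theorem zipOp_append_singleton : ∀ (ys : List Char) (d : Char), ys ≠ [] →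
    zipOp (ys ++ [d]) = zipOp ys ++ [t10OpB (ys.getLastD ' ') d] := by
  intro ys
  induction ys with
  | nil => intro d h; exact absurd rfl h
  | cons a t ih =>
    intro d _
    cases t with
    | nil => rfl
    | cons b r =>
      have := ih d (by simp)
      simp only [List.cons_append] at this ⊢
      simp only [zipOp, this]
      simp

theorem zipOp_iter_length (l : List Char) : ∀ t, (zipOp^[t] l).length = l.length - t := by
  intro t
  induction t with
  | zero => simp
  | succ t ih =>
    rw [Function.iterate_succ_apply', zipOp_length, ih]
    omega

theorem rows_append (xs : List Char) (c : Char) : ∀ t, t ≤ xs.length →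
    zipOp^[t] (xs ++ [c]) = zipOp^[t] xs ++ [elast xs c t] := by
  intro t
  induction t with
  | zero => intro _; rfl
  | succ t ih =>
    intro ht
    have hne : zipOp^[t] xs ≠ [] := by
      intro h
      have := zipOp_iter_length xs t
      rw [h] at this
      simp at this
      omega
    rw [Function.iterate_succ_apply', ih (by omega),
        zipOp_append_singleton _ _ hne, Function.iterate_succ_apply']
    rfl

def gAcc : List Char → Char → List Char
  | [], _ => []
  | old :: rest, cur => cur :: gAcc rest (t10OpB old cur)

def gCur : List Char → Char → Char
  | [], cur => cur
  | old :: rest, cur => gCur rest (t10OpB old cur)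

theorem innerFold_eq : ∀ (D : List Char) (acc : List Char) (cur : Char),
    D.foldl (fun (p : List Char × Char) old => (p.1 ++ [p.2], t10OpB old p.2)) (acc, cur)
      = (acc ++ gAcc D cur, gCur D cur) := by
  intro D
  induction D with
  | nil => intro acc cur; simp [gAcc, gCur]
  | cons old rest ih =>
    intro acc cur
    simp only [List.foldl_cons, ih, gAcc, gCur, List.append_assoc, List.singleton_append]

theorem gAcc_gCur_rows (xs : List Char) (c : Char) : ∀ (n s : Nat),
    gAcc ((List.range' s n).map (fun t => (zipOp^[t] xs).getLastD ' ')) (elast xs c s)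
      = (List.range' s n).map (elast xs c) ∧
    gCur ((List.range' s n).map (fun t => (zipOp^[t] xs).getLastD ' ')) (elast xs c s)
      = elast xs c (s + n) := by
  intro n
  induction n with
  | zero => intro s; simp [gAcc, gCur]
  | succ n ih =>
    intro s
    rw [List.range'_succ]
    have hstep : t10OpB ((zipOp^[s] xs).getLastD ' ') (elast xs c s) = elast xs c (s + 1) := rfl
    obtain ⟨h1, h2⟩ := ih (s + 1)
    simp only [List.map_cons, gAcc, gCur, hstep, h1, h2]
    constructor
    · trivial
    · congr 1; omega

def diagSpec (xs : List Char) : List Char :=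
  (List.range xs.length).map (fun t => (zipOp^[t] xs).getLastD ' ')

theorem bFold_eq (l : List Char) : l.foldl t10AltStep [] = diagSpec l := by
  induction l using List.reverseRecOn with
  | nil => rfl
  | append_singleton xs c ih =>
    rw [List.foldl_append, List.foldl_cons, List.foldl_nil, ih]
    unfold t10AltStep diagSpec
    rw [List.range_eq_range'] at *
    rw [innerFold_eq]
    obtain ⟨h1, h2⟩ := gAcc_gCur_rows xs c xs.length 0
    simp only [elast] at h1 h2
    simp only [h1, h2, List.nil_append]
    have hlen : (xs ++ [c]).length = xs.length + 1 := by simp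
    rw [hlen, List.range_succ, List.map_append, ← List.range_eq_range', Nat.zero_add]
    congr 1
    · apply List.map_congr_left
      intro t ht
      have ht' : t ≤ xs.length := Nat.le_of_lt (List.mem_range.mp ht)
      rw [rows_append xs c t ht', List.getLastD_concat]
    · simp only [List.map_cons, List.map_nil]
      rw [rows_append xs c xs.length le_rfl, List.getLastD_concat]

theorem toList_ne_nil_of_ne_empty (s : String) (h : s ≠ "") : s.toList ≠ [] := by
  intro hnil
  apply h
  have : s.toList = ("" : String).toList := by simpa using hnil
  exact String.toList_inj.mp this

-- ===== VERDICT (by name: the statement is the Claim_ definition above) =====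
theorem t10_spec : Claim_equal_t10 := by
  intro string _ hpre
  unfold Spec_t10 t10 t10_alt
  have hne : string.toList ≠ [] := toList_ne_nil_of_ne_empty string hpre
  obtain ⟨n, hn⟩ : ∃ n, string.toList.length = n + 1 := by
    cases h : string.toList with
    | nil => exact absurd h hne
    | cons a t => exact ⟨t.length, List.length_cons ..⟩
  rw [t10While_eq n _ hn, bFold_eq]
  unfold diagSpec
  rw [hn, List.range_succ, List.map_append]
  simp only [List.map_cons, List.map_nil]
  rw [List.getLastD_concat]
  have h1 : (zipOp^[n] string.toList).length = 1 := by
    rw [zipOp_iter_length, hn]; omega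
  obtain ⟨a, ha⟩ := List.length_eq_one_iff.mp h1
  rw [ha]
  rfl
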